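-- pv_equiv track=rewrite | github.com/happy96026/interview-prep | coding_problems/apr/apr18.py | chainedWords
-- ===== SOURCE A (Python) =====
-- def chainedWords(words):
--     if not words:
--         return False
--
--     graph = {}
--     for word in words:
--         for i in (0, -1):
--             graph[word[i]] = graph.get(word[i], { 'indegree': 0, 'edges': [] })
--
--         graph[word[0]]['edges'].append(word[-1])
--         graph[word[-1]]['indegree'] += 1
--
--     stack = [words[0][0]]
--     visited = set()
--     while stack:
--         char = stack.pop()
--         if char not in visited:
--             visited.add(char)
--             for adj in graph[char]['edges']:
--                 stack.append(adj)
--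
--     if len(visited) != len(graph):
--         return False
--
--     for char in graph:
--         if graph[char]['indegree'] != len(graph[char]['edges']):
--             return False
--
--     return True
-- ===== SOURCE B (Python) =====
-- def chainedWords(words):
--     if not words:
--         return False
--
--     # degree balance: out-degree minus in-degree per character, in one tally dict
--     bal = {}
--     for w in words:
--         bal[w[0]] = bal.get(w[0], 0) + 1
--         bal[w[-1]] = bal.get(w[-1], 0) - 1
--
--     # forward reachability from the first word's head by round-based saturation
--     # (distinct-last-chars + 1 rounds always reach the fixpoint)
--     reach = {words[0][0]}
--     for _ in range(len({w[-1] for w in words}) + 1):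
--         for w in words:
--             if w[0] in reach:
--                 reach.add(w[-1])
--
--     return all(v == 0 for v in bal.values()) and all(w[0] in reach for w in words)
-- ===== Notes on version B (the rewrite author's own statement) =====
-- stated objective: alternative
-- what changed: Replaces A's explicit adjacency-dict build plus stack-based DFS with a round-based reachability saturation directly over the word list, and replaces A's per-node indegree/edge-list bookkeeping with a single out-minus-in tally dict checked for all zeros.
import Mathlib
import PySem

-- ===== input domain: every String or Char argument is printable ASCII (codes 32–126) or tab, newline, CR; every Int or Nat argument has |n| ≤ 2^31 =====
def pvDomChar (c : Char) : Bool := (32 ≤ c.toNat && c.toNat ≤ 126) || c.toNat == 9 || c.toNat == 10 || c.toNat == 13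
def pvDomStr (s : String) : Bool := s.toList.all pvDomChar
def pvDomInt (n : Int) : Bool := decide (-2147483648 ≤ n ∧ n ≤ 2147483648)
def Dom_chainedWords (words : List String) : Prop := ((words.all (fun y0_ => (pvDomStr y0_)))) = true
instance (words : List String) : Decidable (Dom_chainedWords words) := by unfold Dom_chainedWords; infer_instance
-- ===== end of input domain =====

-- B replaces A's adjacency-dict + stack DFS with round-based reachability saturation over the
-- word list and a single out-minus-in degree tally (an alternative algorithm, not claimed faster).

-- w[0] / w[-1]; Pre_ keeps every word nonempty, so the .getD default is never read
def pvHead (w : String) : Char := (PySem.Str.pyGet? w 0).getD ' '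
def pvLast (w : String) : Char := (PySem.Str.pyGet? w (-1)).getD ' '

-- ===== PORT A =====
-- one iteration of A's graph-building loop
def pvAddWord (g : PySem.Dict Char (Int × List Char)) (w : String) :
    PySem.Dict Char (Int × List Char) :=
  let g1 := g.insert (pvHead w) (g.getD (pvHead w) (0, []))
  let g2 := g1.insert (pvLast w) (g1.getD (pvLast w) (0, []))
  let g3 := g2.modify (pvHead w) (0, []) (fun p => (p.1, p.2 ++ [pvLast w]))
  g3.modify (pvLast w) (0, []) (fun p => (p.1 + 1, p.2))

-- A's while-loop DFS; stack.pop() takes the LAST element (ported by hand with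
-- getLast?/dropLast, exact); the fuel argument only makes the recursion structural —
-- the proofs below show words.length + 1 steps always empty the stack
def pvDfs (g : PySem.Dict Char (Int × List Char)) :
    Nat → List Char → PySem.Set Char → PySem.Set Char
  | 0, _, vis => vis
  | fuel + 1, stack, vis =>
    match stack.getLast? with
    | none => vis
    | some c =>
      let rest := stack.dropLast
      if PySem.Set.contains vis c then pvDfs g fuel rest vis
      else pvDfs g fuel (rest ++ (g.getD c (0, [])).2) (PySem.Set.add vis c)

def chainedWords (words : List String) : Bool :=
  match words with
  | [] => false
  | w0 :: _ =>
    let g := words.foldl pvAddWord PySem.Dict.empty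
    let visited := pvDfs g (words.length + 1) [pvHead w0] PySem.Set.empty
    if PySem.Set.len visited != (g.size : Int) then false
    else g.keys.all fun c => (g.getD c (0, [])).1 == ((g.getD c (0, [])).2.length : Int)

-- ===== PORT B =====
-- one iteration of B's tally loop: bal[w[0]] += 1; bal[w[-1]] -= 1
def pvBalStep (d : PySem.Dict Char Int) (w : String) : PySem.Dict Char Int :=
  let d1 := d.insert (pvHead w) (d.getD (pvHead w) 0 + 1)
  d1.insert (pvLast w) (d1.getD (pvLast w) 0 - 1)

-- one saturation round: for w in words: if w[0] in reach: reach.add(w[-1])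
def pvSweep (words : List String) (r : PySem.Set Char) : PySem.Set Char :=
  words.foldl
    (fun r w => if PySem.Set.contains r (pvHead w) then PySem.Set.add r (pvLast w) else r) r

def chainedWords_alt (words : List String) : Bool :=
  match words with
  | [] => false
  | w0 :: _ =>
    let bal := words.foldl pvBalStep PySem.Dict.empty
    let rounds := (PySem.Set.ofList (words.map pvLast)).length + 1
    let reach := (PySem.List.pyRange 0 (rounds : Int) 1).foldl
      (fun r _ => pvSweep words r) (PySem.Set.ofList [pvHead w0])
    (bal.values.all fun v => v == 0) && words.all fun w => PySem.Set.contains reach (pvHead w)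

-- ===== PRECONDITION & SPEC =====
-- Pre_ excludes exactly the inputs containing an empty string, on which A raises IndexError at word[0]
def Pre_chainedWords (words : List String) : Prop := ∀ w ∈ words, w ≠ ""
instance (words : List String) : Decidable (Pre_chainedWords words) := by
  unfold Pre_chainedWords; infer_instance
def pvWitness_chainedWords : List String := ["ab", "ba"]

def Spec_chainedWords (words : List String) (out : Bool) : Prop := out = chainedWords_alt words
instance (words : List String) (out : Bool) : Decidable (Spec_chainedWords words out) := by
  unfold Spec_chainedWords; infer_instance

-- ===== CLAIM (what is proved, stated in full; the proofs are below) =====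
def Claim_equal_chainedWords : Prop := ∀ (words : List String), Dom_chainedWords words →
  Pre_chainedWords words → Spec_chainedWords words (chainedWords words)

-- ===== LEMMAS AND PROOFS =====

def pvNode (words : List String) (c : Char) : Prop := ∃ w ∈ words, pvHead w = c ∨ pvLast w = c

inductive PvReach (words : List String) (s : Char) : Char → Prop
  | refl : PvReach words s s
  | step {w : String} : w ∈ words → PvReach words s (pvHead w) → PvReach words s (pvLast w)

lemma pvAddWord_getD (g : PySem.Dict Char (Int × List Char)) (w : String) (c : Char) :
    (pvAddWord g w).getD c (0, []) =
      ((g.getD c (0, [])).1 + (if c = pvLast w then 1 else 0),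
       (g.getD c (0, [])).2 ++ (if c = pvHead w then [pvLast w] else [])) := by
  unfold pvAddWord
  simp only [PySem.Dict.getD_modify, PySem.Dict.getD_insert]
  by_cases h1 : c = pvHead w <;> by_cases h2 : c = pvLast w <;>
    simp [h1, h2] <;> simp_all [eq_comm]

lemma pvAddWord_mem_keys (g : PySem.Dict Char (Int × List Char)) (w : String) (c : Char) :
    c ∈ (pvAddWord g w).keys ↔ c = pvHead w ∨ c = pvLast w ∨ c ∈ g.keys := by
  unfold pvAddWord
  simp only [PySem.Dict.keys_modify, PySem.Dict.mem_keys_insert]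
  tauto

lemma pvAddWord_nodup_keys (g : PySem.Dict Char (Int × List Char)) (w : String)
    (h : g.keys.Nodup) : (pvAddWord g w).keys.Nodup := by
  unfold pvAddWord
  simp only [PySem.Dict.keys_modify]
  exact PySem.Dict.nodup_keys_insert _ _ _ (PySem.Dict.nodup_keys_insert _ _ _
    (PySem.Dict.nodup_keys_insert _ _ _ (PySem.Dict.nodup_keys_insert _ _ _ h)))

lemma pvBuild_getD (ws : List String) (g : PySem.Dict Char (Int × List Char)) (c : Char) :
    ((ws.foldl pvAddWord g).getD c (0, [])) =
      ((g.getD c (0, [])).1 + ((ws.filter fun w => pvLast w == c).length : Int),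
       (g.getD c (0, [])).2 ++ (ws.filter fun w => pvHead w == c).map pvLast) := by
  induction ws generalizing g with
  | nil => simp
  | cons w ws ih =>
    simp only [List.foldl_cons, ih (pvAddWord g w), pvAddWord_getD, List.filter_cons, beq_iff_eq]
    by_cases hl : pvLast w = c <;> by_cases hh : pvHead w = c
    all_goals simp [hl, hh, eq_comm, Prod.ext_iff]
    · ring
    · exact ⟨by ring, fun h => hh h.symm⟩
    · exact fun h => hl h.symm
    · exact ⟨fun h => hl h.symm, fun h => hh h.symm⟩

lemma pvBuild_mem_keys (ws : List String) (g : PySem.Dict Char (Int × List Char)) (c : Char) :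
    c ∈ (ws.foldl pvAddWord g).keys ↔ c ∈ g.keys ∨ ∃ w ∈ ws, pvHead w = c ∨ pvLast w = c := by
  induction ws generalizing g with
  | nil => simp
  | cons w ws ih =>
    simp only [List.foldl_cons, ih (pvAddWord g w), pvAddWord_mem_keys, List.mem_cons]
    constructor
    · rintro ((h | h | h) | ⟨w', hw', h⟩)
      · exact Or.inr ⟨w, Or.inl rfl, Or.inl h.symm⟩
      · exact Or.inr ⟨w, Or.inl rfl, Or.inr h.symm⟩
      · exact Or.inl h
      · exact Or.inr ⟨w', Or.inr hw', h⟩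
    · rintro (h | ⟨w', (rfl | hw'), h⟩)
      · exact Or.inl (Or.inr (Or.inr h))
      · rcases h with h | h
        · exact Or.inl (Or.inl h.symm)
        · exact Or.inl (Or.inr (Or.inl h.symm))
      · exact Or.inr ⟨w', hw', h⟩

lemma pvBuild_nodup_keys (ws : List String) (g : PySem.Dict Char (Int × List Char))
    (h : g.keys.Nodup) : (ws.foldl pvAddWord g).keys.Nodup := by
  induction ws generalizing g with
  | nil => exact h
  | cons w ws ih => exact ih _ (pvAddWord_nodup_keys _ _ h)

lemma pvG_getD (words : List String) (c : Char) :
    ((words.foldl pvAddWord PySem.Dict.empty).getD c (0, [])) =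
      (((words.filter fun w => pvLast w == c).length : Int),
       (words.filter fun w => pvHead w == c).map pvLast) := by
  simp [pvBuild_getD, PySem.Dict.getD_empty]

lemma pvG_mem_keys (words : List String) (c : Char) :
    c ∈ (words.foldl pvAddWord PySem.Dict.empty).keys ↔ pvNode words c := by
  simp [pvBuild_mem_keys, PySem.Dict.keys_empty, pvNode]

lemma pvG_nodup_keys (words : List String) :
    (words.foldl pvAddWord PySem.Dict.empty).keys.Nodup := by
  apply pvBuild_nodup_keys; simp [PySem.Dict.keys_empty]

lemma pvG_mem_edges (words : List String) (c d : Char) :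
    d ∈ ((words.foldl pvAddWord PySem.Dict.empty).getD c (0, [])).2 ↔
      ∃ w ∈ words, pvHead w = c ∧ pvLast w = d := by
  rw [pvG_getD]
  simp only [List.mem_map, List.mem_filter, beq_iff_eq]
  tauto

lemma pvBalStep_getD (d : PySem.Dict Char Int) (w : String) (c : Char) :
    (pvBalStep d w).getD c 0 =
      d.getD c 0 + (if c = pvHead w then 1 else 0) - (if c = pvLast w then 1 else 0) := by
  unfold pvBalStep
  simp only [PySem.Dict.getD_insert]
  by_cases h1 : c = pvHead w <;> by_cases h2 : c = pvLast w
  all_goals simp [h1, h2]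
  all_goals simp_all [eq_comm]

lemma pvBalStep_mem_keys (d : PySem.Dict Char Int) (w : String) (c : Char) :
    c ∈ (pvBalStep d w).keys ↔ c = pvHead w ∨ c = pvLast w ∨ c ∈ d.keys := by
  unfold pvBalStep
  simp only [PySem.Dict.mem_keys_insert]
  tauto

lemma pvBalStep_nodup_keys (d : PySem.Dict Char Int) (w : String)
    (h : d.keys.Nodup) : (pvBalStep d w).keys.Nodup := by
  exact PySem.Dict.nodup_keys_insert _ _ _ (PySem.Dict.nodup_keys_insert _ _ _ h)

lemma pvBal_getD (ws : List String) (d : PySem.Dict Char Int) (c : Char) :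
    ((ws.foldl pvBalStep d).getD c 0) =
      d.getD c 0 + ((ws.filter fun w => pvHead w == c).length : Int)
        - ((ws.filter fun w => pvLast w == c).length : Int) := by
  induction ws generalizing d with
  | nil => simp
  | cons w ws ih =>
    simp only [List.foldl_cons, ih (pvBalStep d w), pvBalStep_getD, List.filter_cons, beq_iff_eq]
    by_cases h1 : c = pvHead w <;> by_cases h2 : c = pvLast w
    all_goals simp [h1, h2, eq_comm]
    all_goals try simp_all
    all_goals try split_ifs
    all_goals try simp_all [eq_comm]
    all_goals omega

lemma pvBal_mem_keys (words : List String) (c : Char) :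
    c ∈ (words.foldl pvBalStep PySem.Dict.empty).keys ↔ pvNode words c := by
  have h : ∀ (ws : List String) (d : PySem.Dict Char Int),
      c ∈ (ws.foldl pvBalStep d).keys ↔ c ∈ d.keys ∨ ∃ w ∈ ws, pvHead w = c ∨ pvLast w = c := by
    intro ws
    induction ws with
    | nil => simp
    | cons w ws ih =>
      intro d
      simp only [List.foldl_cons, ih (pvBalStep d w), pvBalStep_mem_keys, List.mem_cons]
      constructor
      · rintro ((h | h | h) | ⟨w', hw', h⟩)
        · exact Or.inr ⟨w, Or.inl rfl, Or.inl h.symm⟩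
        · exact Or.inr ⟨w, Or.inl rfl, Or.inr h.symm⟩
        · exact Or.inl h
        · exact Or.inr ⟨w', Or.inr hw', h⟩
      · rintro (h | ⟨w', (rfl | hw'), h⟩)
        · exact Or.inl (Or.inr (Or.inr h))
        · rcases h with h | h
          · exact Or.inl (Or.inl h.symm)
          · exact Or.inl (Or.inr (Or.inl h.symm))
        · exact Or.inr ⟨w', hw', h⟩
  simp [h, PySem.Dict.keys_empty, pvNode]

lemma pvBal_nodup_keys (words : List String) :
    (words.foldl pvBalStep PySem.Dict.empty).keys.Nodup := by
  have h : ∀ (ws : List String) (d : PySem.Dict Char Int), d.keys.Nodup →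
      (ws.foldl pvBalStep d).keys.Nodup := by
    intro ws
    induction ws with
    | nil => exact fun d h => h
    | cons w ws ih => exact fun d h => ih _ (pvBalStep_nodup_keys _ _ h)
  apply h; simp [PySem.Dict.keys_empty]

def pvStep1 (r : PySem.Set Char) (w : String) : PySem.Set Char :=
  if PySem.Set.contains r (pvHead w) then PySem.Set.add r (pvLast w) else r

lemma pvSweep_eq (l : List String) (r : PySem.Set Char) : pvSweep l r = l.foldl pvStep1 r := rfl

lemma pvStep1_of_not_head (r : PySem.Set Char) (w : String) (h : pvHead w ∉ r) :
    pvStep1 r w = r := by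
  unfold pvStep1
  rw [if_neg]
  simp [h]

lemma pvStep1_of_head (r : PySem.Set Char) (w : String) (h : pvHead w ∈ r) :
    pvStep1 r w = PySem.Set.add r (pvLast w) := by
  unfold pvStep1
  rw [if_pos]
  simpa [PySem.Set.contains_iff] using h

lemma pvStep1_cases (r : PySem.Set Char) (w : String) :
    pvStep1 r w = r ∨ (pvHead w ∈ r ∧ pvLast w ∉ r ∧ pvStep1 r w = r ++ [pvLast w]) := by
  by_cases h : pvHead w ∈ r
  · by_cases hm : pvLast w ∈ r
    · rw [pvStep1_of_head _ _ h, PySem.Set.add_of_mem hm]; exact Or.inl rfl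
    · rw [pvStep1_of_head _ _ h, PySem.Set.add_of_not_mem hm]; exact Or.inr ⟨h, hm, rfl⟩
  · rw [pvStep1_of_not_head _ _ h]; exact Or.inl rfl

lemma pvSweep_ext (l : List String) (r : PySem.Set Char) :
    ∃ ext, pvSweep l r = r ++ ext ∧ ∀ c ∈ ext, ∃ w ∈ l, pvLast w = c := by
  induction l generalizing r with
  | nil => exact ⟨[], by simp [pvSweep]⟩
  | cons w l ih =>
    rw [pvSweep_eq] at *
    simp only [List.foldl_cons]
    rcases pvStep1_cases r w with h | ⟨-, -, h⟩ <;> rw [h]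
    · obtain ⟨ext, he, hs⟩ := ih r
      rw [pvSweep_eq] at he
      exact ⟨ext, he, fun c hc => by
        obtain ⟨w', h1, h2⟩ := hs c hc; exact ⟨w', List.mem_cons_of_mem _ h1, h2⟩⟩
    · obtain ⟨ext, he, hs⟩ := ih (r ++ [pvLast w])
      rw [pvSweep_eq] at he
      refine ⟨pvLast w :: ext, by simpa using he, fun c hc => ?_⟩
      rcases List.mem_cons.mp hc with rfl | hc
      · exact ⟨w, List.mem_cons_self, rfl⟩
      · obtain ⟨w', h1, h2⟩ := hs c hc
        exact ⟨w', List.mem_cons_of_mem _ h1, h2⟩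

lemma pvSweep_subset (l : List String) (r : PySem.Set Char) : r ⊆ pvSweep l r := by
  obtain ⟨ext, he, -⟩ := pvSweep_ext l r
  rw [he]; exact List.subset_append_left _ _

lemma pvSweep_mem_src (l : List String) (r : PySem.Set Char) (c : Char)
    (h : c ∈ pvSweep l r) : c ∈ r ∨ ∃ w ∈ l, pvLast w = c := by
  obtain ⟨ext, he, hs⟩ := pvSweep_ext l r
  rw [he] at h
  rcases List.mem_append.mp h with h | h
  · exact Or.inl h
  · exact Or.inr (hs c h)

lemma pvSweep_nodup (l : List String) (r : PySem.Set Char) (h : r.Nodup) :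
    (pvSweep l r).Nodup := by
  induction l generalizing r with
  | nil => exact h
  | cons w l ih =>
    rw [pvSweep_eq] at *
    simp only [List.foldl_cons]
    rcases pvStep1_cases r w with heq | ⟨-, hm, heq⟩ <;> rw [heq]
    · exact ih r h
    · exact ih _ (by
        simp only [List.nodup_append, h, true_and, List.nodup_cons, List.not_mem_nil,
          not_false_iff, List.nodup_nil, and_true]
        aesop)

lemma pvSweep_length_mono (l : List String) (r : PySem.Set Char) :
    r.length ≤ (pvSweep l r).length := by
  obtain ⟨ext, he, -⟩ := pvSweep_ext l r
  simp [he]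

lemma pvSweep_sound (words : List String) (s : Char) (l : List String) (r : PySem.Set Char)
    (hl : ∀ w ∈ l, w ∈ words) (hr : ∀ c ∈ r, PvReach words s c) :
    ∀ c ∈ pvSweep l r, PvReach words s c := by
  induction l generalizing r with
  | nil => exact hr
  | cons w l ih =>
    rw [pvSweep_eq] at *
    simp only [List.foldl_cons]
    refine ih _ (fun w' hw' => hl w' (List.mem_cons_of_mem _ hw')) ?_
    intro c hc
    by_cases hh : pvHead w ∈ r
    · rw [pvStep1_of_head _ _ hh] at hc
      rcases (PySem.Set.mem_add _ _ _).mp hc with h | rfl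
      · exact hr c h
      · exact PvReach.step (hl w List.mem_cons_self) (hr _ hh)
    · rw [pvStep1_of_not_head _ _ hh] at hc
      exact hr c hc

lemma pvSweep_fixed_closed (l : List String) (r : PySem.Set Char)
    (hfix : pvSweep l r = r) : ∀ w ∈ l, pvHead w ∈ r → pvLast w ∈ r := by
  induction l generalizing r with
  | nil => simp
  | cons w l ih =>
    rw [pvSweep_eq] at *
    simp only [List.foldl_cons] at hfix
    rcases pvStep1_cases r w with heq | ⟨-, hm, heq⟩
    · rw [heq] at hfix
      intro w' hw' hh
      rcases List.mem_cons.mp hw' with rfl | hw'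
      · by_cases hlm : pvLast w' ∈ r
        · exact hlm
        · exfalso
          rw [pvStep1_of_head _ _ hh, PySem.Set.add_of_not_mem hlm] at heq
          simpa using congrArg List.length heq
      · exact ih r hfix w' hw' hh
    · exfalso
      rw [heq] at hfix
      have := pvSweep_length_mono l (r ++ [pvLast w])
      rw [pvSweep_eq, hfix] at this
      simp at this

lemma pvFoldl_const_iterate {α β : Type} (l : List α) (f : β → β) (s : β) :
    l.foldl (fun r _ => f r) s = f^[l.length] s := by
  induction l generalizing s with
  | nil => rfl
  | cons x l ih => simpa [Function.iterate_succ_apply] using ih (f s)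

lemma pvIter_subset (words : List String) (n : Nat) (s : PySem.Set Char) :
    s ⊆ (pvSweep words)^[n] s := by
  induction n generalizing s with
  | zero => simp
  | succ n ih =>
    rw [Function.iterate_succ_apply]
    exact fun c hc => ih (pvSweep words s) (pvSweep_subset words s hc)

lemma pvIter_nodup (words : List String) (n : Nat) (s : PySem.Set Char) (h : s.Nodup) :
    ((pvSweep words)^[n] s).Nodup := by
  induction n generalizing s with
  | zero => exact h
  | succ n ih =>
    rw [Function.iterate_succ_apply]
    exact ih _ (pvSweep_nodup words s h)

lemma pvIter_mem_src (words : List String) (n : Nat) (s : PySem.Set Char) (c : Char)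
    (h : c ∈ (pvSweep words)^[n] s) : c ∈ s ∨ ∃ w ∈ words, pvLast w = c := by
  induction n generalizing s with
  | zero => exact Or.inl h
  | succ n ih =>
    rw [Function.iterate_succ_apply] at h
    rcases ih _ h with h' | h'
    · exact pvSweep_mem_src words s c h'
    · exact Or.inr h'

lemma pvIter_sound (words : List String) (s0 : Char) (n : Nat) (s : PySem.Set Char)
    (hs : ∀ c ∈ s, PvReach words s0 c) :
    ∀ c ∈ (pvSweep words)^[n] s, PvReach words s0 c := by
  induction n generalizing s with
  | zero => exact hs
  | succ n ih =>
    rw [Function.iterate_succ_apply]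
    exact ih _ (pvSweep_sound words s0 words s (fun _ h => h) hs)

lemma pvIter_growth (words : List String) (n : Nat) (s : PySem.Set Char) :
    pvSweep words ((pvSweep words)^[n] s) = (pvSweep words)^[n] s ∨
      s.length + n ≤ ((pvSweep words)^[n] s).length := by
  induction n with
  | zero => exact Or.inr (by simp)
  | succ n ih =>
    rcases ih with hfix | hlen
    · rw [Function.iterate_succ_apply', hfix]
      exact Or.inl hfix
    · by_cases hfix : pvSweep words ((pvSweep words)^[n] s) = (pvSweep words)^[n] s
      · rw [Function.iterate_succ_apply', hfix]
        exact Or.inl hfix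
      · right
        rw [Function.iterate_succ_apply']
        obtain ⟨ext, he, -⟩ := pvSweep_ext words ((pvSweep words)^[n] s)
        rcases ext with _ | ⟨x, ext⟩
        · simp at he; exact absurd he hfix
        · rw [he]; simp; omega

lemma pvRounds_fixed (words : List String) (s0 : Char) :
    pvSweep words ((pvSweep words)^[(PySem.Set.ofList (words.map pvLast)).length + 1] [s0]) =
      (pvSweep words)^[(PySem.Set.ofList (words.map pvLast)).length + 1] [s0] := by
  set L := (PySem.Set.ofList (words.map pvLast)).length with hL
  rcases pvIter_growth words (L + 1) [s0] with hfix | hlen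
  · exact hfix
  · exfalso
    set R := (pvSweep words)^[L + 1] [s0] with hR
    have hsub : R ⊆ s0 :: PySem.Set.ofList (words.map pvLast) := by
      intro c hc
      rcases pvIter_mem_src words (L + 1) [s0] c hc with h | ⟨w, hw, h⟩
      · simp at h; simp [h]
      · refine List.mem_cons_of_mem _ ((PySem.Set.mem_ofList _ _).mpr ?_)
        exact h ▸ List.mem_map_of_mem (f := pvLast) hw
    have hnd : R.Nodup := pvIter_nodup words (L + 1) [s0] (List.nodup_singleton s0)
    have hle : R.length ≤ L + 1 := by
      have := (hnd.subperm hsub).length_le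
      simpa using this
    simp at hlen
    omega

lemma pvIter_mem_iff (words : List String) (s0 : Char) (c : Char) :
    c ∈ (pvSweep words)^[(PySem.Set.ofList (words.map pvLast)).length + 1] [s0] ↔
      PvReach words s0 c := by
  constructor
  · exact fun h => pvIter_sound words s0 _ [s0]
      (by intro c hc; simp at hc; subst hc; exact PvReach.refl) c h
  · intro h
    induction h with
    | refl => exact pvIter_subset words _ [s0] (by simp)
    | step hw _ ih =>
      exact pvSweep_fixed_closed words _ (pvRounds_fixed words s0) _ hw ih

lemma pvContains_add (s : PySem.Set Char) (x k : Char) :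
    PySem.Set.contains (PySem.Set.add s x) k = (PySem.Set.contains s k || k == x) := by
  rw [Bool.eq_iff_iff]
  simp [PySem.Set.mem_add]

def pvRem (words : List String) (vis : PySem.Set Char) : Nat :=
  (((words.foldl pvAddWord PySem.Dict.empty).keys.filter
      fun k => !(PySem.Set.contains vis k)).map
    fun k => ((words.foldl pvAddWord PySem.Dict.empty).getD k (0, [])).2.length).sum

lemma pvSum_filter_drop (f : Char → Nat) (p q : Char → Bool) (K : List Char) (c : Char)
    (hnd : K.Nodup) (hc : c ∈ K) (hpc : p c = true)
    (hq : ∀ k, q k = (p k && !(k == c))) :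
    ((K.filter p).map f).sum = f c + ((K.filter q).map f).sum := by
  induction K with
  | nil => simp at hc
  | cons k K ih =>
    have hknotin : k ∉ K := (List.nodup_cons.mp hnd).1
    have hndK : K.Nodup := (List.nodup_cons.mp hnd).2
    rcases List.mem_cons.mp hc with rfl | hc'
    · have hfilt : K.filter q = K.filter p := by
        apply List.filter_congr
        intro x hx
        have hxc : (x == c) = false := by
          simp only [beq_eq_false_iff_ne, ne_eq]
          rintro rfl; exact hknotin hx
        simp [hq x, hxc]
      simp only [List.filter_cons, hpc, if_pos, hq c, beq_self_eq_true, Bool.not_true,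
        Bool.and_false, hfilt]
      simp
    · have hkc : (k == c) = false := by
        simp only [beq_eq_false_iff_ne, ne_eq]
        rintro rfl; exact hknotin hc'
      have hqk : q k = p k := by simp [hq k, hkc]
      by_cases hpk : p k = true
      · simp only [List.filter_cons, hpk, hqk, if_pos, List.map_cons, List.sum_cons,
          ih hndK hc']
        omega
      · simp only [List.filter_cons, hpk, hqk, if_neg, Bool.false_eq_true, not_false_iff]
        exact ih hndK hc'

lemma pvRem_add (words : List String) (vis : PySem.Set Char) (c : Char)
    (hc : pvNode words c) (hnv : c ∉ vis) :
    pvRem words vis =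
      ((words.foldl pvAddWord PySem.Dict.empty).getD c (0, [])).2.length +
        pvRem words (PySem.Set.add vis c) := by
  apply pvSum_filter_drop _ _ _ _ c (pvG_nodup_keys words) ((pvG_mem_keys words c).mpr hc)
  · simp [hnv]
  · intro k
    rw [pvContains_add]
    simp [Bool.not_or]

lemma pvSum_indicator (K : List Char) (a : Char) (hnd : K.Nodup) (ha : a ∈ K) :
    (K.map fun k => if a = k then 1 else 0).sum = 1 := by
  induction K with
  | nil => simp at ha
  | cons k K ih =>
    have hknotin : k ∉ K := (List.nodup_cons.mp hnd).1
    have hndK : K.Nodup := (List.nodup_cons.mp hnd).2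
    rcases List.mem_cons.mp ha with rfl | ha'
    · have hz : (K.map fun k => if a = k then 1 else 0).sum = 0 := by
        rw [List.sum_eq_zero_iff]
        intro x hx
        simp only [List.mem_map] at hx
        obtain ⟨b, hb, hbx⟩ := hx
        have : ¬ a = b := by rintro rfl; exact hknotin hb
        simp [this] at hbx
        omega
      simp [hz]
    · have : ¬ a = k := by rintro rfl; exact hknotin ha'
      simp [this, ih hndK ha']

lemma pvSum_map_add (K : List Char) (a b : Char → Nat) :
    (K.map fun k => a k + b k).sum = (K.map a).sum + (K.map b).sum := by
  induction K with
  | nil => rfl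
  | cons k K ih => simp [ih]; omega

lemma pvSum_heads (ws : List String) (K : List Char) (hnd : K.Nodup)
    (hall : ∀ w ∈ ws, pvHead w ∈ K) :
    (K.map fun k => (ws.filter fun w => pvHead w == k).length).sum = ws.length := by
  induction ws with
  | nil => simp
  | cons w ws ih =>
    have hmapeq : (K.map fun k => ((w :: ws).filter fun w' => pvHead w' == k).length) =
        K.map fun k => (if pvHead w = k then 1 else 0) +
          (ws.filter fun w' => pvHead w' == k).length := by
      apply List.map_congr_left
      intro k _
      simp only [List.filter_cons]
      by_cases h : pvHead w = k
      · simp [h]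
        omega
      · simp [h]
    rw [hmapeq, pvSum_map_add, pvSum_indicator K (pvHead w) hnd (hall w List.mem_cons_self),
      ih (fun w' hw' => hall w' (List.mem_cons_of_mem _ hw'))]
    simp
    omega

lemma pvRem_empty (words : List String) : pvRem words PySem.Set.empty = words.length := by
  unfold pvRem
  have h1 : ((words.foldl pvAddWord PySem.Dict.empty).keys.filter
      fun k => !(PySem.Set.contains PySem.Set.empty k)) =
      (words.foldl pvAddWord PySem.Dict.empty).keys := by
    apply List.filter_eq_self.mpr
    intro k _
    rfl
  rw [h1]
  have h2 : ((words.foldl pvAddWord PySem.Dict.empty).keys.map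
      fun k => ((words.foldl pvAddWord PySem.Dict.empty).getD k (0, [])).2.length) =
      (words.foldl pvAddWord PySem.Dict.empty).keys.map
        fun k => (words.filter fun w => pvHead w == k).length := by
    apply List.map_congr_left
    intro k _
    rw [pvG_getD]
    simp
  rw [h2]
  exact pvSum_heads words _ (pvG_nodup_keys words)
    (fun w hw => (pvG_mem_keys words (pvHead w)).mpr ⟨w, hw, Or.inl rfl⟩)

lemma pvDfs_main (words : List String) (s : Char) :
    ∀ (fuel : Nat) (stack : List Char) (vis : PySem.Set Char),
    vis.Nodup →
    (∀ c ∈ vis, PvReach words s c) →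
    (∀ c ∈ stack, PvReach words s c) →
    (∀ c ∈ vis, pvNode words c) →
    (∀ c ∈ stack, pvNode words c) →
    (∀ c ∈ vis, ∀ d ∈ ((words.foldl pvAddWord PySem.Dict.empty).getD c (0, [])).2,
       d ∈ vis ∨ d ∈ stack) →
    stack.length + pvRem words vis ≤ fuel →
    ((pvDfs (words.foldl pvAddWord PySem.Dict.empty) fuel stack vis).Nodup ∧
     (∀ c ∈ pvDfs (words.foldl pvAddWord PySem.Dict.empty) fuel stack vis, PvReach words s c) ∧
     (∀ c ∈ pvDfs (words.foldl pvAddWord PySem.Dict.empty) fuel stack vis, pvNode words c) ∧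
     (∀ c ∈ vis, c ∈ pvDfs (words.foldl pvAddWord PySem.Dict.empty) fuel stack vis) ∧
     (∀ c ∈ stack, c ∈ pvDfs (words.foldl pvAddWord PySem.Dict.empty) fuel stack vis) ∧
     (∀ c ∈ pvDfs (words.foldl pvAddWord PySem.Dict.empty) fuel stack vis,
        ∀ d ∈ ((words.foldl pvAddWord PySem.Dict.empty).getD c (0, [])).2,
          d ∈ pvDfs (words.foldl pvAddWord PySem.Dict.empty) fuel stack vis)) := by
  intro fuel
  induction fuel with
  | zero =>
    intro stack vis hnd hvr hsr hvn hsn hcl hb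
    have hs0 : stack = [] := by
      have := List.length_eq_zero_iff.mp (by omega : stack.length = 0)
      exact this
    subst hs0
    simp only [pvDfs]
    exact ⟨hnd, hvr, hvn, fun c hc => hc, by simp, fun c hc d hd => by
      rcases hcl c hc d hd with h | h
      · exact h
      · simp at h⟩
  | succ f ih =>
    intro stack vis hnd hvr hsr hvn hsn hcl hb
    rcases List.eq_nil_or_concat stack with rfl | ⟨rest, c, rfl⟩
    · simp only [pvDfs]
      exact ⟨hnd, hvr, hvn, fun c hc => hc, by simp, fun c hc d hd => by
        rcases hcl c hc d hd with h | h
        · exact h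
        · simp at h⟩
    · simp only [List.concat_eq_append] at hsr hsn hcl hb ⊢
      simp only [pvDfs, List.getLast?_concat, List.dropLast_concat]
      by_cases hvc : c ∈ vis
      · rw [if_pos (by simpa [PySem.Set.contains_iff] using hvc)]
        have hres := ih rest vis hnd hvr
          (fun c' hc' => hsr c' (List.mem_append_left _ hc'))
          hvn (fun c' hc' => hsn c' (List.mem_append_left _ hc'))
          (fun c' hc' d hd => by
            rcases hcl c' hc' d hd with h | h
            · exact Or.inl h
            · rcases List.mem_append.mp h with h | h
              · exact Or.inr h
              · simp at h; subst h; exact Or.inl hvc)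
          (by simp at hb; omega)
        refine ⟨hres.1, hres.2.1, hres.2.2.1, hres.2.2.2.1, ?_, hres.2.2.2.2.2⟩
        intro c' hc'
        rcases List.mem_append.mp hc' with h | h
        · exact hres.2.2.2.2.1 c' h
        · simp at h; subst h; exact hres.2.2.2.1 _ hvc
      · rw [if_neg (by simpa [PySem.Set.contains_iff] using hvc)]
        have hcreach : PvReach words s c := hsr c (List.mem_append_right _ (by simp))
        have hcnode : pvNode words c := hsn c (List.mem_append_right _ (by simp))
        have hedge : ∀ d ∈ ((words.foldl pvAddWord PySem.Dict.empty).getD c (0, [])).2,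
            ∃ w ∈ words, pvHead w = c ∧ pvLast w = d := by
          intro d hd
          exact (pvG_mem_edges words c d).mp hd
        have hrem := pvRem_add words vis c hcnode hvc
        have hres := ih (rest ++ ((words.foldl pvAddWord PySem.Dict.empty).getD c (0, [])).2)
          (PySem.Set.add vis c)
          (PySem.Set.nodup_add _ _ hnd)
          (fun c' hc' => by
            rcases (PySem.Set.mem_add _ _ _).mp hc' with h | rfl
            · exact hvr c' h
            · exact hcreach)
          (fun c' hc' => by
            rcases List.mem_append.mp hc' with h | h
            · exact hsr c' (List.mem_append_left _ h)
            · obtain ⟨w, hw, hh, hl⟩ := hedge c' h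
              exact hl ▸ PvReach.step hw (hh ▸ hcreach))
          (fun c' hc' => by
            rcases (PySem.Set.mem_add _ _ _).mp hc' with h | rfl
            · exact hvn c' h
            · exact hcnode)
          (fun c' hc' => by
            rcases List.mem_append.mp hc' with h | h
            · exact hsn c' (List.mem_append_left _ h)
            · obtain ⟨w, hw, hh, hl⟩ := hedge c' h
              exact ⟨w, hw, Or.inr hl⟩)
          (fun c' hc' d hd => by
            rcases (PySem.Set.mem_add _ _ _).mp hc' with h | rfl
            · rcases hcl c' h d hd with h' | h'
              · exact Or.inl ((PySem.Set.mem_add _ _ _).mpr (Or.inl h'))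
              · rcases List.mem_append.mp h' with h' | h'
                · exact Or.inr (List.mem_append_left _ h')
                · simp at h'; subst h'
                  exact Or.inl ((PySem.Set.mem_add _ _ _).mpr (Or.inr rfl))
            · exact Or.inr (List.mem_append_right _ hd))
          (by simp at hb ⊢; omega)
        refine ⟨hres.1, hres.2.1, hres.2.2.1, ?_, ?_, hres.2.2.2.2.2⟩
        · intro c' hc'
          exact hres.2.2.2.1 c' ((PySem.Set.mem_add _ _ _).mpr (Or.inl hc'))
        · intro c' hc'
          rcases List.mem_append.mp hc' with h | h
          · exact hres.2.2.2.2.1 c' (List.mem_append_left _ h)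
          · simp at h; subst h
            exact hres.2.2.2.1 c' ((PySem.Set.mem_add _ _ _).mpr (Or.inr rfl))

lemma pvVisited_spec (w0 : String) (tl : List String) :
    (pvDfs ((w0 :: tl).foldl pvAddWord PySem.Dict.empty) ((w0 :: tl).length + 1)
        [pvHead w0] PySem.Set.empty).Nodup ∧
    (∀ c, c ∈ pvDfs ((w0 :: tl).foldl pvAddWord PySem.Dict.empty) ((w0 :: tl).length + 1)
        [pvHead w0] PySem.Set.empty ↔ PvReach (w0 :: tl) (pvHead w0) c) ∧
    (∀ c ∈ pvDfs ((w0 :: tl).foldl pvAddWord PySem.Dict.empty) ((w0 :: tl).length + 1)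
        [pvHead w0] PySem.Set.empty, pvNode (w0 :: tl) c) := by
  have hmain := pvDfs_main (w0 :: tl) (pvHead w0) ((w0 :: tl).length + 1) [pvHead w0]
    PySem.Set.empty
    (by simp [PySem.Set.empty])
    (by simp [PySem.Set.empty])
    (by intro c hc; simp at hc; subst hc; exact PvReach.refl)
    (by simp [PySem.Set.empty])
    (by intro c hc; simp at hc; subst hc; exact ⟨w0, List.mem_cons_self, Or.inl rfl⟩)
    (by simp [PySem.Set.empty])
    (by have h := pvRem_empty (w0 :: tl)
        simp only [PySem.Set.empty] at h
        simp [h]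
        omega)
  refine ⟨hmain.1, fun c => ⟨fun hc => hmain.2.1 c hc, fun hr => ?_⟩, hmain.2.2.1⟩
  induction hr with
  | refl => exact hmain.2.2.2.2.1 _ (by simp)
  | step hw _ ihr =>
    exact hmain.2.2.2.2.2 _ ihr _ ((pvG_mem_edges _ _ _).mpr ⟨_, hw, rfl, rfl⟩)

lemma pvConn_iff (words : List String) (s0 : Char) :
    (∀ c, pvNode words c → PvReach words s0 c) ↔
      (∀ w ∈ words, PvReach words s0 (pvHead w)) := by
  constructor
  · exact fun h w hw => h (pvHead w) ⟨w, hw, Or.inl rfl⟩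
  · rintro h c ⟨w, hw, rfl | rfl⟩
    · exact h w hw
    · exact PvReach.step hw (h w hw)

lemma chainedWords_true_iff (w0 : String) (tl : List String) :
    chainedWords (w0 :: tl) = true ↔
      ((∀ c, pvNode (w0 :: tl) c → PvReach (w0 :: tl) (pvHead w0) c) ∧
       (∀ c, pvNode (w0 :: tl) c →
         (((w0 :: tl).filter fun w => pvLast w == c).length =
          ((w0 :: tl).filter fun w => pvHead w == c).length))) := by
  obtain ⟨hnd, hmem, hnode⟩ := pvVisited_spec w0 tl
  have hKnd := pvG_nodup_keys (w0 :: tl)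
  have hsize : ((w0 :: tl).foldl pvAddWord PySem.Dict.empty).keys.length =
      ((w0 :: tl).foldl pvAddWord PySem.Dict.empty).size := by
    simp [PySem.Dict.keys, PySem.Dict.size]
  have hconn : ((pvDfs ((w0 :: tl).foldl pvAddWord PySem.Dict.empty) ((w0 :: tl).length + 1)
        [pvHead w0] PySem.Set.empty).length =
        ((w0 :: tl).foldl pvAddWord PySem.Dict.empty).size) ↔
      (∀ c, pvNode (w0 :: tl) c → PvReach (w0 :: tl) (pvHead w0) c) := by
    constructor
    · intro h c hcnode
      have hsub : pvDfs ((w0 :: tl).foldl pvAddWord PySem.Dict.empty) ((w0 :: tl).length + 1)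
          [pvHead w0] PySem.Set.empty ⊆ ((w0 :: tl).foldl pvAddWord PySem.Dict.empty).keys :=
        fun c' hc' => (pvG_mem_keys _ c').mpr (hnode c' hc')
      have hperm := (hnd.subperm hsub).perm_of_length_le (by omega)
      exact (hmem c).mp (hperm.mem_iff.mpr ((pvG_mem_keys _ c).mpr hcnode))
    · intro h
      have hiff : ∀ c, c ∈ pvDfs ((w0 :: tl).foldl pvAddWord PySem.Dict.empty)
          ((w0 :: tl).length + 1) [pvHead w0] PySem.Set.empty ↔
          c ∈ ((w0 :: tl).foldl pvAddWord PySem.Dict.empty).keys := by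
        intro c
        constructor
        · exact fun hc => (pvG_mem_keys _ c).mpr (hnode c hc)
        · exact fun hc => (hmem c).mpr (h c ((pvG_mem_keys _ c).mp hc))
      have hperm := (List.perm_ext_iff_of_nodup hnd hKnd).mpr hiff
      rw [hperm.length_eq, hsize]
  simp only [chainedWords]
  split_ifs with hif
  · simp only [false_iff]
    rintro ⟨hc, -⟩
    rw [bne_iff_ne] at hif
    apply hif
    have hlen : PySem.Set.len (pvDfs ((w0 :: tl).foldl pvAddWord PySem.Dict.empty)
        ((w0 :: tl).length + 1) [pvHead w0] PySem.Set.empty) =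
        ((pvDfs ((w0 :: tl).foldl pvAddWord PySem.Dict.empty)
        ((w0 :: tl).length + 1) [pvHead w0] PySem.Set.empty).length : Int) := by
      simp [PySem.Set.len]
    rw [hlen]
    exact_mod_cast hconn.mpr hc
  · rw [bne_iff_ne, not_ne_iff] at hif
    have hc : ∀ c, pvNode (w0 :: tl) c → PvReach (w0 :: tl) (pvHead w0) c := by
      apply hconn.mp
      have : PySem.Set.len (pvDfs ((w0 :: tl).foldl pvAddWord PySem.Dict.empty)
          ((w0 :: tl).length + 1) [pvHead w0] PySem.Set.empty) =
          ((pvDfs ((w0 :: tl).foldl pvAddWord PySem.Dict.empty)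
          ((w0 :: tl).length + 1) [pvHead w0] PySem.Set.empty).length : Int) := by
        simp [PySem.Set.len]
      rw [this] at hif
      exact_mod_cast hif
    rw [List.all_eq_true]
    constructor
    · intro h
      refine ⟨hc, fun c hcn => ?_⟩
      have := h c ((pvG_mem_keys _ c).mpr hcn)
      rw [pvG_getD] at this
      simp only [beq_iff_eq, List.length_map] at this
      exact_mod_cast this
    · rintro ⟨-, hb⟩ c hck
      rw [pvG_getD]
      simp only [beq_iff_eq, List.length_map]
      exact_mod_cast hb c ((pvG_mem_keys _ c).mp hck)

lemma chainedWords_alt_true_iff (w0 : String) (tl : List String) :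
    chainedWords_alt (w0 :: tl) = true ↔
      ((∀ c, pvNode (w0 :: tl) c →
         (((w0 :: tl).filter fun w => pvHead w == c).length =
          ((w0 :: tl).filter fun w => pvLast w == c).length)) ∧
       (∀ w ∈ w0 :: tl, PvReach (w0 :: tl) (pvHead w0) (pvHead w))) := by
  simp only [chainedWords_alt, Bool.and_eq_true]
  have hreach : ((PySem.List.pyRange 0
        (((PySem.Set.ofList ((w0 :: tl).map pvLast)).length + 1 : Nat) : Int) 1).foldl
      (fun r _ => pvSweep (w0 :: tl) r) (PySem.Set.ofList [pvHead w0])) =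
      (pvSweep (w0 :: tl))^[(PySem.Set.ofList ((w0 :: tl).map pvLast)).length + 1]
        [pvHead w0] := by
    rw [pvFoldl_const_iterate, PySem.List.length_pyRange_one,
      PySem.Set.ofList_eq_self_of_nodup _ (List.nodup_singleton (pvHead w0))]
    simp
  constructor
  · rintro ⟨hbal, hcon⟩
    constructor
    · intro c hcn
      have hvals := PySem.Dict.values_eq_map_keys _ (pvBal_nodup_keys (w0 :: tl)) 0
      rw [hvals, List.all_map, List.all_eq_true] at hbal
      have := hbal c ((pvBal_mem_keys (w0 :: tl) c).mpr hcn)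
      simp only [Function.comp, beq_iff_eq, pvBal_getD] at this
      have hz : ((((w0 :: tl).filter fun w => pvHead w == c).length : Int) -
          (((w0 :: tl).filter fun w => pvLast w == c).length : Int)) = 0 := by
        rw [PySem.Dict.getD_empty] at this
        omega
      omega
    · intro w hw
      rw [List.all_eq_true] at hcon
      have := hcon w hw
      rw [hreach] at this
      rw [PySem.Set.contains_iff] at this
      exact (pvIter_mem_iff (w0 :: tl) (pvHead w0) (pvHead w)).mp this
  · rintro ⟨hbal, hcon⟩
    constructor
    · have hvals := PySem.Dict.values_eq_map_keys _ (pvBal_nodup_keys (w0 :: tl)) 0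
      rw [hvals, List.all_map, List.all_eq_true]
      intro c hck
      have hcn := (pvBal_mem_keys (w0 :: tl) c).mp hck
      have := hbal c hcn
      simp only [Function.comp, beq_iff_eq, pvBal_getD, PySem.Dict.getD_empty]
      omega
    · rw [List.all_eq_true]
      intro w hw
      rw [hreach, PySem.Set.contains_iff]
      exact (pvIter_mem_iff (w0 :: tl) (pvHead w0) (pvHead w)).mpr (hcon w hw)

lemma chainedWords_eq_alt (words : List String) :
    chainedWords words = chainedWords_alt words := by
  cases words with
  | nil => rfl
  | cons w0 tl =>
    rw [Bool.eq_iff_iff, chainedWords_true_iff, chainedWords_alt_true_iff]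
    constructor
    · rintro ⟨hc, hb⟩
      exact ⟨fun c hcn => (hb c hcn).symm, (pvConn_iff _ _).mp hc⟩
    · rintro ⟨hb, hc⟩
      exact ⟨(pvConn_iff _ _).mpr hc, fun c hcn => (hb c hcn).symm⟩

-- ===== VERDICT (by name: the statement is the Claim_ definition above) =====
theorem chainedWords_spec : Claim_equal_chainedWords := by
  intro words _ _
  exact chainedWords_eq_alt words
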